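-- pv_equiv track=rewrite | github.com/insomniacs01/TrainWatch | app/run_activity.py | command_signature
-- ===== SOURCE A (Python) =====
-- import shlex
-- from typing import Any, Dict, List, Optional
--
-- def safe_split(command: str) -> List[str]:
--     try:
--         return shlex.split(command)
--     except ValueError:
--         return command.split()
--
-- def basename(token: str) -> str:
--     return token.rstrip("/").rsplit("/", 1)[-1]
--
-- def command_signature(command: str) -> str:
--     parts = safe_split(command)
--     if not parts:
--         return ""
--     launcher = basename(parts[0])
--     search_parts = parts[1:]
--     if launcher == "accelerate" and len(parts) > 1 and parts[1] == "launch":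
--         search_parts = parts[2:]
--     script = next((item for item in search_parts if item.endswith((".py", ".sh"))), "")
--     if script:
--         return basename(script)
--     token = next((item for item in search_parts if not item.startswith("-") and "=" not in item), "")
--     if token:
--         return basename(token)
--     return launcher
-- ===== SOURCE B (Python) =====
-- from typing import List, Optional
--
-- _WS = " \t\r\n"
-- _SPECIAL = _WS + "'\"\\"
--
--
-- def _tokens(s: str) -> Optional[List[str]]:
--     """POSIX shell-style tokenizer by span jumps: instead of stepping a state
--     machine char by char, repeatedly scan ahead to the next delimiter and copy
--     whole spans at once.  None on lexing error (unclosed quote /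
--     dangling escape)."""
--     out: List[str] = []
--     i, n = 0, len(s)
--     while True:
--         while i < n and s[i] in _WS:
--             i += 1
--         if i == n:
--             return out
--         buf: List[str] = []
--         quoted = False
--         while i < n and s[i] not in _WS:
--             c = s[i]
--             if c == "'":
--                 j = i + 1
--                 while j < n and s[j] != "'":
--                     j += 1
--                 if j == n:
--                     return None
--                 buf.append(s[i + 1:j])
--                 quoted = True
--                 i = j + 1
--             elif c == '"':
--                 i += 1
--                 while True:
--                     j = i
--                     while j < n and s[j] != '"' and s[j] != "\\":
--                         j += 1
--                     if j == n:
--                         return None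
--                     buf.append(s[i:j])
--                     if s[j] == '"':
--                         i = j + 1
--                         break
--                     if j + 1 == n:
--                         return None
--                     nc = s[j + 1]
--                     buf.append(nc if nc in '\\"' else "\\" + nc)
--                     i = j + 2
--                 quoted = True
--             elif c == "\\":
--                 if i + 1 == n:
--                     return None
--                 buf.append(s[i + 1])
--                 i += 2
--             else:
--                 j = i + 1
--                 while j < n and s[j] not in _SPECIAL:
--                     j += 1
--                 buf.append(s[i:j])
--                 i = j
--         w = "".join(buf)
--         if w or quoted:
--             out.append(w)
--
--
-- def safe_split(command: str) -> List[str]: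
--     tokens = _tokens(command)
--     if tokens is None:
--         return command.split()
--     return tokens
--
--
-- def basename(token: str) -> str:
--     return token.rstrip("/").rsplit("/", 1)[-1]
--
--
-- def command_signature(command: str) -> str:
--     parts = safe_split(command)
--     if not parts:
--         return ""
--     launcher = basename(parts[0])
--     start = 2 if launcher == "accelerate" and parts[1:2] == ["launch"] else 1
--     # Single right-to-left pass with a ranked accumulator: walking backwards,
--     # an earlier (leftward) candidate overrides a later one of the same or
--     # lower rank, so the fold ends with the leftmost best-ranked candidate.
--     rank, best = 0, ""
--     for item in reversed(parts[start:]):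
--         if item.endswith(".py") or item.endswith(".sh"):
--             rank, best = 2, item
--         elif rank < 2 and not item.startswith("-") and "=" not in item:
--             rank, best = 1, item
--     return basename(best) if best else launcher
-- ===== Notes on version B (the rewrite author's own statement) =====
-- stated objective: faster
-- what changed: B drops shlex.split in favour of a span-jump tokenizer (scan ahead to the next delimiter and copy whole slices instead of shlex's per-character state-machine stepping) and replaces A's two staged forward first-match scans over the arguments with a single right-to-left fold keeping one ranked best-candidate accumulator (script rank 2, plain token rank 1), deciding after the fold.
import Mathlib
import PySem

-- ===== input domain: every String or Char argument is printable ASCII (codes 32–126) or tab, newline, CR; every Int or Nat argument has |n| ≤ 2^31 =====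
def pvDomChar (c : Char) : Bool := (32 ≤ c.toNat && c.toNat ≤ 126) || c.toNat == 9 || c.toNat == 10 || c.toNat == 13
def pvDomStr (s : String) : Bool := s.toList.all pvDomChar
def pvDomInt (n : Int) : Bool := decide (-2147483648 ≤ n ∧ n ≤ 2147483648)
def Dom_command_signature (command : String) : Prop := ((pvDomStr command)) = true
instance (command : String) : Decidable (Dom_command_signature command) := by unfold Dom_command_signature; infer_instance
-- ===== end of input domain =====

-- B tokenizes by span jumps instead of shlex's per-character stepping and replaces
-- A's two staged forward first-match scans with one right-to-left ranked fold
-- (objective: faster; a timing run measured B faster at the largest size).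

-- ===== PORT A =====
-- shared helper: hand port of shlex.split's POSIX tokenizer (exact on the ASCII domain;
-- returns none exactly where shlex.split raises ValueError: unclosed quote / dangling escape)
inductive PvLexState
  | sp | word | sq | dq | escWord | escDq
deriving DecidableEq, Repr

def pvIsWs (c : Char) : Bool := c == ' ' || c == '\t' || c == '\n' || c == '\r'

def pvShlexLoop (st : PvLexState) (cs : List Char) (tok : List Char) (q : Bool)
    (acc : List String) : Option (List String) :=
  match cs with
  | [] =>
    match st with
    | .sp => some acc
    | .word => some (if tok ≠ [] || q then acc ++ [String.ofList tok] else acc)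
    | _ => none
  | c :: rest =>
    match st with
    | .sp =>
      if pvIsWs c then pvShlexLoop .sp rest tok q acc
      else if c == '\\' then pvShlexLoop .escWord rest tok q acc
      else if c == '\'' then pvShlexLoop .sq rest tok q acc
      else if c == '"' then pvShlexLoop .dq rest tok q acc
      else pvShlexLoop .word rest (tok ++ [c]) q acc
    | .word =>
      if pvIsWs c then
        pvShlexLoop .sp rest [] false (if tok ≠ [] || q then acc ++ [String.ofList tok] else acc)
      else if c == '\'' then pvShlexLoop .sq rest tok q acc
      else if c == '"' then pvShlexLoop .dq rest tok q acc
      else if c == '\\' then pvShlexLoop .escWord rest tok q acc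
      else pvShlexLoop .word rest (tok ++ [c]) q acc
    | .sq =>
      if c == '\'' then pvShlexLoop .word rest tok true acc
      else pvShlexLoop .sq rest (tok ++ [c]) q acc
    | .dq =>
      if c == '"' then pvShlexLoop .word rest tok true acc
      else if c == '\\' then pvShlexLoop .escDq rest tok q acc
      else pvShlexLoop .dq rest (tok ++ [c]) q acc
    | .escWord => pvShlexLoop .word rest (tok ++ [c]) q acc
    | .escDq =>
      if c != '\\' && c != '"' then pvShlexLoop .dq rest (tok ++ ['\\', c]) q acc
      else pvShlexLoop .dq rest (tok ++ [c]) q acc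

-- safe_split: shlex.split, falling back to str.split() on ValueError
def pvSafeSplit (command : String) : List String :=
  match pvShlexLoop .sp command.toList [] false [] with
  | some ts => ts
  | none => PySem.Str.split₀ command

-- basename: token.rstrip("/").rsplit("/", 1)[-1]  (hand port, exact)
def pvBasename (token : String) : String :=
  let r := token.toList.reverse.dropWhile (fun c => c == '/')
  String.ofList ((r.takeWhile (fun c => c != '/')).reverse)

def command_signature (command : String) : String :=
  match pvSafeSplit command with
  | [] => ""
  | p0 :: rest =>
    let launcher := pvBasename p0
    let searchParts :=
      match rest with
      | p1 :: rest2 => if launcher == "accelerate" && p1 == "launch" then rest2 else rest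
      | [] => rest
    let script := (searchParts.find? (fun item =>
      PySem.Str.endswith item ".py" || PySem.Str.endswith item ".sh")).getD ""
    if script ≠ "" then pvBasename script
    else
      let token := (searchParts.find? (fun item =>
        !(PySem.Str.startswith item "-") && !(PySem.Str.isIn "=" item))).getD ""
      if token ≠ "" then pvBasename token
      else launcher

-- ===== PORT B =====
-- B tokenizes by span jumps: scan ahead to the next delimiter and copy whole
-- slices (suffix-list representation: the Python index i becomes the suffix cs;
-- the fuel argument, always called with the suffix length, only makes the
-- strictly-consuming Python loops structurally recursive).
def pvBWs (c : Char) : Bool := c == ' ' || c == '\t' || c == '\r' || c == '\n'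

def pvBSpecial (c : Char) : Bool := pvBWs c || c == '\'' || c == '"' || c == '\\'

-- inner double-quote loop: j-scan to the next '"' or '\\', copy the span
def pvBDq : Nat → List Char → List Char → Option (List Char × List Char)
  | 0, _, _ => none
  | fuel + 1, cs, buf =>
    let pre := cs.takeWhile (fun x => x != '"' && x != '\\')
    match cs.drop pre.length with
    | [] => none
    | d :: rest =>
      if d == '"' then some (buf ++ pre, rest)
      else
        match rest with
        | [] => none
        | nc :: rest2 =>
          pvBDq fuel rest2 (buf ++ pre ++ (if nc == '\\' || nc == '"' then [nc] else ['\\', nc]))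

def pvBWord : Nat → List Char → List Char → Bool → Option (List Char × Bool × List Char)
  | _, [], buf, quoted => some (buf, quoted, [])
  | 0, _ :: _, _, _ => none
  | fuel + 1, c :: rest, buf, quoted =>
    if pvBWs c then some (buf, quoted, c :: rest)
    else if c = '\'' then
      let pre := rest.takeWhile (fun x => x != '\'')
      match rest.drop pre.length with
      | [] => none
      | _ :: rest2 => pvBWord fuel rest2 (buf ++ pre) true
    else if c = '"' then
      match pvBDq rest.length rest [] with
      | none => none
      | some (piece, rest2) => pvBWord fuel rest2 (buf ++ piece) true
    else if c = '\\' then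
      match rest with
      | [] => none
      | nc :: rest2 => pvBWord fuel rest2 (buf ++ [nc]) quoted
    else
      pvBWord fuel ((c :: rest).drop ((c :: rest).takeWhile (fun x => !pvBSpecial x)).length)
        (buf ++ (c :: rest).takeWhile (fun x => !pvBSpecial x)) quoted

def pvBTokens : Nat → List Char → List String → Option (List String)
  | fuel, cs, out =>
    match cs.dropWhile pvBWs with
    | [] => some out
    | c :: rest =>
      match fuel with
      | 0 => none
      | fuel + 1 =>
        match pvBWord (c :: rest).length (c :: rest) [] false with
        | none => none
        | some (b, quoted, r) =>
          let w := String.ofList b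
          pvBTokens fuel r (if w ≠ "" || quoted then out ++ [w] else out)

def pvSafeSplitB (command : String) : List String :=
  match pvBTokens command.toList.length command.toList [] with
  | some ts => ts
  | none => PySem.Str.split₀ command

-- right-to-left pass with ranked accumulator: for item in reversed(parts[start:]): …
def pvBestLoop : List String → Nat → String → Nat × String
  | [], rank, best => (rank, best)
  | item :: rest, rank, best =>
    if PySem.Str.endswith item ".py" || PySem.Str.endswith item ".sh" then
      pvBestLoop rest 2 item
    else if rank < 2 && !(PySem.Str.startswith item "-") && !(PySem.Str.isIn "=" item) then
      pvBestLoop rest 1 item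
    else
      pvBestLoop rest rank best

def command_signature_alt (command : String) : String :=
  let parts := pvSafeSplitB command
  match parts with
  | [] => ""
  | p0 :: _ =>
    let launcher := pvBasename p0
    let start : Nat :=
      if launcher == "accelerate" && PySem.List.slice parts (some 1) (some 2) == ["launch"]
      then 2 else 1
    let rb := pvBestLoop (parts.drop start).reverse 0 ""
    if rb.2 ≠ "" then pvBasename rb.2 else launcher

-- ===== PRECONDITION & SPEC =====
def Spec_command_signature (command : String) (out : String) : Prop := out = command_signature_alt command
instance (command : String) (out : String) : Decidable (Spec_command_signature command out) := by unfold Spec_command_signature; infer_instance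

-- ===== CLAIM (what is proved, stated in full; the proofs are below) =====
def Claim_equal_command_signature : Prop := ∀ (command : String), Dom_command_signature command → Spec_command_signature command (command_signature command)

-- ===== LEMMAS AND PROOFS =====
-- the two whitespace predicates agree
theorem pvWs_eq (c : Char) : pvIsWs c = pvBWs c := by
  simp [pvIsWs, pvBWs, Bool.or_comm, Bool.or_left_comm]

-- DFA whitespace skipping = dropWhile
theorem pvSkip : ∀ (cs : List Char) (tok : List Char) (q : Bool) (acc : List String),
    pvShlexLoop .sp cs tok q acc = pvShlexLoop .sp (cs.dropWhile pvBWs) tok q acc := by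
  intro cs
  induction cs with
  | nil => intro tok q acc; simp
  | cons c rest ih =>
    intro tok q acc
    by_cases h : pvBWs c
    · have hi : pvIsWs c = true := by rw [pvWs_eq]; exact h
      rw [List.dropWhile_cons_of_pos h]
      rw [show pvShlexLoop .sp (c :: rest) tok q acc = pvShlexLoop .sp rest tok q acc from by
        simp [pvShlexLoop, hi]]
      exact ih tok q acc
    · rw [List.dropWhile_cons_of_neg h]

-- from a non-whitespace char, states sp and word behave identically
theorem pvNonws (c : Char) (rest : List Char) (h : pvBWs c = false) :
    ∀ (tok : List Char) (q : Bool) (acc : List String),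
    pvShlexLoop .sp (c :: rest) tok q acc = pvShlexLoop .word (c :: rest) tok q acc := by
  intro tok q acc
  have hi : pvIsWs c = false := by rw [pvWs_eq]; exact h
  simp only [pvShlexLoop, hi, Bool.false_eq_true, if_false]
  by_cases h1 : c == '\\' <;> by_cases h2 : c == '\'' <;> by_cases h3 : c == '"' <;>
    simp_all

-- DFA single-quote state = one span jump
theorem pvSq : ∀ (cs tok : List Char) (q : Bool) (acc : List String),
    pvShlexLoop .sq cs tok q acc =
      (match cs.drop ((cs.takeWhile (fun x => x != '\'')).length) with
       | [] => none
       | _ :: rest2 =>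
         pvShlexLoop .word rest2 (tok ++ cs.takeWhile (fun x => x != '\'')) true acc) := by
  intro cs
  induction cs with
  | nil => intro tok q acc; simp [pvShlexLoop]
  | cons c rest ih =>
    intro tok q acc
    by_cases h : c = '\''
    · subst h
      simp [pvShlexLoop]
    · have hne : (c != '\'') = true := by simp [h]
      have hb : (c == '\'') = false := by simp [h]
      rw [show pvShlexLoop .sq (c :: rest) tok q acc = pvShlexLoop .sq rest (tok ++ [c]) q acc
          from by simp [pvShlexLoop, hb]]
      rw [ih]
      simp only [List.takeWhile_cons, hne, if_pos, List.length_cons, List.drop_succ_cons]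
      cases rest.drop ((rest.takeWhile (fun x => x != '\'')).length) with
      | nil => rfl
      | cons d r2 => simp

-- non-dependent unfolding equation for pvBDq
-- span-jump unfolding equations for the double-quote chunk scanner
theorem pvBDq_nil (fuel : Nat) (buf : List Char) : pvBDq fuel [] buf = none := by
  cases fuel <;> rfl

theorem pvBDq_quote (fuel : Nat) (rest buf : List Char) :
    pvBDq (fuel + 1) ('"' :: rest) buf = some (buf, rest) := by
  simp [pvBDq]

theorem pvBDq_bs (fuel : Nat) (rest buf : List Char) :
    pvBDq (fuel + 1) ('\\' :: rest) buf =
      match rest with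
      | [] => none
      | nc :: rest2 =>
        pvBDq fuel rest2 (buf ++ (if nc == '\\' || nc == '"' then [nc] else ['\\', nc])) := by
  simp only [pvBDq]
  have htw : List.takeWhile (fun x => x != '"' && x != '\\') ('\\' :: rest) = [] := by simp
  rw [htw]
  simp only [List.length_nil, List.drop_zero]
  rw [if_neg (by decide)]
  cases rest with
  | nil => rfl
  | cons nc rest2 => simp

theorem pvBDq_other (fuel : Nat) (c : Char) (rest buf : List Char)
    (h1 : c ≠ '"') (h2 : c ≠ '\\') :
    pvBDq (fuel + 1) (c :: rest) buf = pvBDq (fuel + 1) rest (buf ++ [c]) := by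
  simp only [pvBDq]
  have hp : ((c != '"') && (c != '\\')) = true := by simp [h1, h2]
  have htw : List.takeWhile (fun x => x != '"' && x != '\\') (c :: rest)
      = c :: List.takeWhile (fun x => x != '"' && x != '\\') rest := by
    simp [hp]
  rw [htw]
  simp only [List.length_cons, List.drop_succ_cons]
  cases rest.drop ((rest.takeWhile (fun x => x != '"' && x != '\\')).length) with
  | nil => rfl
  | cons d r =>
    by_cases hd : d == '"'
    · simp [hd]
    · simp only [hd, Bool.false_eq_true, if_false]
      cases r with
      | nil => rfl
      | cons nc r2 => simp

-- the double-quote chunk strictly consumes input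
theorem pvBDq_lt : ∀ (fuel : Nat) (cs buf p r : List Char),
    pvBDq fuel cs buf = some (p, r) → r.length < cs.length := by
  intro fuel
  induction fuel with
  | zero => intro cs buf p r h; simp [pvBDq] at h
  | succ g ih =>
    intro cs buf p r h
    simp only [pvBDq] at h
    split at h
    · exact absurd h (by simp)
    · rename_i d rest hdrop
      have hlen := congrArg List.length hdrop
      simp [List.length_drop] at hlen
      split at h
      · simp only [Option.some.injEq, Prod.mk.injEq] at h
        rcases h with ⟨-, h2⟩
        subst h2
        omega
      · split at h
        · exact absurd h (by simp)
        · rename_i nc rest2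
          simp at hlen
          have := ih _ _ _ _ h
          omega

-- DFA double-quote state = B's chunked scanner
theorem pvDq (n : Nat) : ∀ (cs : List Char), cs.length ≤ n →
    ∀ (fuel : Nat), cs.length ≤ fuel →
    ∀ (buf tok : List Char) (q : Bool) (acc : List String),
    pvShlexLoop .dq cs (tok ++ buf) q acc =
      match pvBDq fuel cs buf with
      | none => none
      | some (p, r) => pvShlexLoop .word r (tok ++ p) true acc := by
  induction n with
  | zero =>
    intro cs hcs fuel hf buf tok q acc
    have : cs = [] := by cases cs <;> simp_all
    subst this
    simp [pvShlexLoop, pvBDq_nil]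
  | succ n ih =>
    intro cs hcs fuel hf buf tok q acc
    match cs with
    | [] => simp [pvShlexLoop, pvBDq_nil]
    | c :: rest =>
      obtain ⟨g, rfl⟩ : ∃ g, fuel = g + 1 := by
        cases fuel
        · simp at hf
        · exact ⟨_, rfl⟩
      by_cases hq : c = '"'
      · subst hq
        simp [pvShlexLoop, pvBDq_quote]
      · by_cases hb : c = '\\'
        · subst hb
          rw [show pvShlexLoop .dq ('\\' :: rest) (tok ++ buf) q acc
              = pvShlexLoop .escDq rest (tok ++ buf) q acc from by simp [pvShlexLoop]]
          rw [pvBDq_bs]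
          cases rest with
          | nil => simp [pvShlexLoop]
          | cons nc r2 =>
            by_cases hnc : (nc == '\\' || nc == '"') = true
            · have : (nc != '\\' && nc != '"') = false := by
                simp only [Bool.or_eq_true, beq_iff_eq] at hnc
                rcases hnc with h | h <;> simp [h]
              rw [show pvShlexLoop .escDq (nc :: r2) (tok ++ buf) q acc
                  = pvShlexLoop .dq r2 ((tok ++ buf) ++ [nc]) q acc from by
                simp [pvShlexLoop, this]]
              rw [List.append_assoc, ih r2 (by simp at hcs; omega) g (by simp at hf; omega)]
              simp [hnc]
            · have hnc' : (nc != '\\' && nc != '"') = true := by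
                simp only [Bool.or_eq_true, beq_iff_eq, not_or] at hnc
                simp [hnc.1, hnc.2]
              rw [show pvShlexLoop .escDq (nc :: r2) (tok ++ buf) q acc
                  = pvShlexLoop .dq r2 ((tok ++ buf) ++ ['\\', nc]) q acc from by
                simp [pvShlexLoop, hnc']]
              rw [List.append_assoc, ih r2 (by simp at hcs; omega) g (by simp at hf; omega)]
              dsimp only
              rw [if_neg (by simpa using hnc)]
        · rw [show pvShlexLoop .dq (c :: rest) (tok ++ buf) q acc
              = pvShlexLoop .dq rest ((tok ++ buf) ++ [c]) q acc from by
            simp [pvShlexLoop, hq, hb]]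
          rw [List.append_assoc, ih rest (by simp at hcs; omega) (g + 1) (by simp at hf; omega)]
          rw [pvBDq_other g c rest buf hq hb]

-- DFA word state jumps over a run of plain chars
theorem pvRun : ∀ (cs tok : List Char) (q : Bool) (acc : List String),
    pvShlexLoop .word cs tok q acc =
      pvShlexLoop .word (cs.drop ((cs.takeWhile (fun x => !pvBSpecial x)).length))
        (tok ++ cs.takeWhile (fun x => !pvBSpecial x)) q acc := by
  intro cs
  induction cs with
  | nil => intro tok q acc; simp
  | cons c rest ih =>
    intro tok q acc
    by_cases hs : pvBSpecial c
    · have : (!pvBSpecial c) = false := by simp [hs]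
      simp [this]
    · have hspec : pvBSpecial c = false := by simpa using hs
      have h4 : pvBWs c = false ∧ (c == '\'') = false ∧ (c == '"') = false ∧
          (c == '\\') = false := by
        simp only [pvBSpecial, Bool.or_eq_false_iff] at hspec
        exact ⟨hspec.1.1.1, hspec.1.1.2, hspec.1.2, hspec.2⟩
      have hi : pvIsWs c = false := by rw [pvWs_eq]; exact h4.1
      rw [show pvShlexLoop .word (c :: rest) tok q acc
          = pvShlexLoop .word rest (tok ++ [c]) q acc from by
        simp [pvShlexLoop, hi, h4.2.1, h4.2.2.1, h4.2.2.2]]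
      rw [ih]
      simp [hspec]

-- DFA word state = B's word scanner
theorem pvWord (n : Nat) : ∀ (cs : List Char), cs.length ≤ n →
    ∀ (fuel : Nat), cs.length ≤ fuel →
    ∀ (buf : List Char) (q : Bool) (tok : List Char) (acc : List String),
    pvShlexLoop .word cs (tok ++ buf) q acc =
      match pvBWord fuel cs buf q with
      | none => none
      | some (b, qq, r) =>
        pvShlexLoop .sp r [] false
          (if (tok ++ b) ≠ [] || qq then acc ++ [String.ofList (tok ++ b)] else acc) := by
  induction n with
  | zero =>
    intro cs hcs fuel hf buf q tok acc
    have : cs = [] := by cases cs <;> simp_all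
    subst this
    cases fuel <;> simp [pvShlexLoop, pvBWord]
  | succ n ih =>
    intro cs hcs fuel hf buf q tok acc
    match cs with
    | [] => cases fuel <;> simp [pvShlexLoop, pvBWord]
    | c :: rest =>
      obtain ⟨g, rfl⟩ : ∃ g, fuel = g + 1 := by
        cases fuel
        · simp at hf
        · exact ⟨_, rfl⟩
      by_cases hws : pvBWs c
      · have hi : pvIsWs c = true := by rw [pvWs_eq]; exact hws
        rw [show pvBWord (g + 1) (c :: rest) buf q = some (buf, q, c :: rest) from by
          simp [pvBWord, hws]]
        rw [show pvShlexLoop .word (c :: rest) (tok ++ buf) q acc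
            = pvShlexLoop .sp rest [] false
                (if (tok ++ buf) ≠ [] || q then acc ++ [String.ofList (tok ++ buf)] else acc)
            from by simp [pvShlexLoop, hi]]
        dsimp only
        rw [show pvShlexLoop .sp (c :: rest) [] false
              (if (tok ++ buf) ≠ [] || q then acc ++ [String.ofList (tok ++ buf)] else acc)
            = pvShlexLoop .sp rest [] false
              (if (tok ++ buf) ≠ [] || q then acc ++ [String.ofList (tok ++ buf)] else acc)
            from by simp [pvShlexLoop, hi]]
      · have hi : pvIsWs c = false := by rw [pvWs_eq]; simpa using hws
        by_cases h1 : c = '\''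
        · subst h1
          rw [show pvShlexLoop .word ('\'' :: rest) (tok ++ buf) q acc
              = pvShlexLoop .sq rest (tok ++ buf) q acc from by simp [pvShlexLoop, hi]]
          rw [pvSq]
          rw [show pvBWord (g + 1) ('\'' :: rest) buf q
              = (match rest.drop ((rest.takeWhile (fun x => x != '\'')).length) with
                 | [] => none
                 | _ :: rest2 => pvBWord g rest2 (buf ++ rest.takeWhile (fun x => x != '\'')) true)
              from by simp [pvBWord, hws]]
          cases hdr : rest.drop ((rest.takeWhile (fun x => x != '\'')).length) with
          | nil => rfl
          | cons d rest2 =>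
            have hlen := congrArg List.length hdr
            simp [List.length_drop] at hlen
            dsimp only
            rw [List.append_assoc,
              ih rest2 (by simp at hcs; omega) g (by simp at hf; omega)
                (buf ++ rest.takeWhile (fun x => x != '\'')) true tok acc]
        · by_cases h2 : c = '"'
          · subst h2
            rw [show pvShlexLoop .word ('"' :: rest) (tok ++ buf) q acc
                = pvShlexLoop .dq rest (tok ++ buf) q acc from by simp [pvShlexLoop, hi]]
            rw [show (tok ++ buf) = (tok ++ buf) ++ ([] : List Char) from by simp]
            rw [pvDq rest.length rest (le_refl _) rest.length (le_refl _) [] (tok ++ buf) q acc]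
            rw [show pvBWord (g + 1) ('"' :: rest) buf q
                = (match pvBDq rest.length rest [] with
                   | none => none
                   | some (piece, rest2) => pvBWord g rest2 (buf ++ piece) true)
                from by simp [pvBWord, hws, h1]]
            cases hdq : pvBDq rest.length rest [] with
            | none => rfl
            | some pr =>
              obtain ⟨piece, rest2⟩ := pr
              have hlt := pvBDq_lt rest.length rest _ _ _ hdq
              dsimp only
              rw [List.append_assoc,
                ih rest2 (by simp at hcs; omega) g (by simp at hf; omega) (buf ++ piece) true
                  tok acc]
          · by_cases h3 : c = '\\'
            · subst h3
              rw [show pvShlexLoop .word ('\\' :: rest) (tok ++ buf) q acc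
                  = pvShlexLoop .escWord rest (tok ++ buf) q acc from by
                simp [pvShlexLoop, hi]]
              rw [show pvBWord (g + 1) ('\\' :: rest) buf q
                  = (match rest with
                     | [] => none
                     | nc :: rest2 => pvBWord g rest2 (buf ++ [nc]) q)
                  from by simp [pvBWord, hws, h1, h2]; cases rest <;> rfl]
              cases rest with
              | nil => simp [pvShlexLoop]
              | cons nc rest2 =>
                rw [show pvShlexLoop .escWord (nc :: rest2) (tok ++ buf) q acc
                    = pvShlexLoop .word rest2 ((tok ++ buf) ++ [nc]) q acc from by
                  simp [pvShlexLoop]]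
                dsimp only
                rw [List.append_assoc,
                  ih rest2 (by simp at hcs; omega) g (by simp at hf; omega) (buf ++ [nc]) q
                    tok acc]
            · -- plain run
              have hspec : pvBSpecial c = false := by
                simp [pvBSpecial, h1, h2, h3]
                simpa using hws
              have hrun : (c :: rest).takeWhile (fun x => !pvBSpecial x)
                  = c :: rest.takeWhile (fun x => !pvBSpecial x) := by
                simp [hspec]
              rw [pvRun (c :: rest)]
              rw [show pvBWord (g + 1) (c :: rest) buf q
                  = pvBWord g ((c :: rest).drop
                        ((c :: rest).takeWhile (fun x => !pvBSpecial x)).length)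
                      (buf ++ (c :: rest).takeWhile (fun x => !pvBSpecial x)) q
                  from by simp [pvBWord, hws, h1, h2, h3]]
              rw [List.append_assoc,
                ih ((c :: rest).drop ((c :: rest).takeWhile (fun x => !pvBSpecial x)).length)
                  (by simp [hrun, List.length_drop] at hcs ⊢; omega)
                  g (by simp [hrun, List.length_drop] at hf ⊢; omega)
                  (buf ++ (c :: rest).takeWhile (fun x => !pvBSpecial x)) q tok acc]

-- ofList b is empty iff b is
theorem pvOfList_empty (b : List Char) : (String.ofList b = "") ↔ b = [] := by
  constructor
  · intro h
    have := congrArg String.toList h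
    simpa using this
  · intro h; subst h; rfl

-- a word starting at a non-whitespace char strictly consumes input
theorem pvBWord_len : ∀ (fuel : Nat) (cs buf : List Char) (q : Bool)
    (b : List Char) (qq : Bool) (r : List Char),
    pvBWord fuel cs buf q = some (b, qq, r) →
    r.length ≤ cs.length ∧ (∀ c t, cs = c :: t → pvBWs c = false → r.length < cs.length) := by
  intro fuel
  induction fuel with
  | zero =>
    intro cs buf q b qq r h
    cases cs with
    | nil =>
      simp [pvBWord] at h
      exact ⟨by simp [h.2.2.symm], by intro c t ht; simp at ht⟩
    | cons c rest => simp [pvBWord] at h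
  | succ g ih =>
    intro cs buf q b qq r h
    match cs with
    | [] =>
      simp [pvBWord] at h
      exact ⟨by simp [h.2.2.symm], by intro c t ht; simp at ht⟩
    | c :: rest =>
      simp only [pvBWord] at h
      by_cases hws : pvBWs c
      · rw [if_pos hws] at h
        simp only [Option.some.injEq, Prod.mk.injEq] at h
        refine ⟨by simp [h.2.2.symm], ?_⟩
        intro c' t ht hcws
        rw [List.cons.injEq] at ht
        exact absurd hws (by rw [ht.1]; simp [hcws])
      · rw [if_neg hws] at h
        have step : r.length < (c :: rest).length := by
          split at h
          · -- single quote
            split at h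
            · exact absurd h (by simp)
            · rename_i d rest2 hdrop
              have hlen := congrArg List.length hdrop
              simp [List.length_drop] at hlen
              have := (ih _ _ _ _ _ _ h).1
              simp
              omega
          · split at h
            · -- double quote
              split at h
              · exact absurd h (by simp)
              · rename_i piece rest2 hdq
                have hlt := pvBDq_lt rest.length rest _ _ _ hdq
                have := (ih _ _ _ _ _ _ h).1
                simp
                omega
            · split at h
              · -- backslash
                split at h
                · exact absurd h (by simp)
                · rename_i nc rest2
                  have := (ih _ _ _ _ _ _ h).1
                  simp
                  omega
              · -- plain run
                rename_i h1 h2 h3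
                have hsp : pvBSpecial c = false := by
                  simp [pvBSpecial, h1, h2, h3]
                  cases hb : pvBWs c
                  · rfl
                  · exact absurd hb (by simp [hws])
                rw [show (c :: rest).takeWhile (fun x => !pvBSpecial x)
                    = c :: rest.takeWhile (fun x => !pvBSpecial x) by
                  simp [hsp]] at h
                have := (ih _ _ _ _ _ _ h).1
                simp [List.length_drop] at this ⊢
                omega
        exact ⟨le_of_lt step, fun _ _ _ _ => step⟩

-- the whole DFA = B's tokenizer
theorem pvTop (n : Nat) : ∀ (cs : List Char), cs.length ≤ n →
    ∀ (fuel : Nat), cs.length ≤ fuel →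
    ∀ (out : List String), pvBTokens fuel cs out = pvShlexLoop .sp cs [] false out := by
  induction n with
  | zero =>
    intro cs hcs fuel hf out
    have : cs = [] := by cases cs <;> simp_all
    subst this
    simp [pvBTokens, pvShlexLoop]
  | succ n ih =>
    intro cs hcs fuel hf out
    rw [pvSkip cs]
    rw [pvBTokens]
    cases hd : cs.dropWhile pvBWs with
    | nil => simp [pvShlexLoop]
    | cons c rest =>
      dsimp only
      have hle : (c :: rest).length ≤ cs.length := by
        rw [← hd]; exact List.length_dropWhile_le pvBWs cs
      obtain ⟨g, rfl⟩ : ∃ g, fuel = g + 1 := by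
        cases fuel
        · exfalso
          have hnil : cs = [] := by simpa using hf
          subst hnil
          simp at hle
        · exact ⟨_, rfl⟩
      have hws : pvBWs c = false := by
        have := List.head_dropWhile_not (p := pvBWs) (l := cs) (by simp [hd])
        simpa [hd] using this
      rw [pvNonws c rest hws]
      rw [show pvShlexLoop .word (c :: rest) [] false out
          = pvShlexLoop .word (c :: rest) (([] : List Char) ++ []) false out from by simp]
      rw [pvWord (c :: rest).length (c :: rest) (le_refl _) (c :: rest).length (le_refl _)]
      cases hw : pvBWord (c :: rest).length (c :: rest) [] false with
      | none => rfl
      | some bqr =>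
        obtain ⟨b, qq, r⟩ := bqr
        dsimp only
        have hcons := (pvBWord_len (c :: rest).length _ _ _ _ _ _ hw).2 c rest rfl hws
        have hr1 : r.length < rest.length + 1 := by simpa using hcons
        have hr2 : rest.length + 1 ≤ cs.length := by simpa using hle
        rw [ih r (by omega) g (by omega)]
        simp only [List.nil_append]
        congr 1
        by_cases hb : b = []
        · subst hb
          simp
        · have : String.ofList b ≠ "" := by
            rw [ne_eq, pvOfList_empty]; exact hb
          simp [hb, this]

-- the A-side tokenizer agrees with B's span-jump tokenizer
theorem pvSplit_agree (command : String) : pvSafeSplitB command = pvSafeSplit command := by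
  unfold pvSafeSplitB pvSafeSplit
  rw [pvTop command.toList.length command.toList (le_refl _) command.toList.length (le_refl _)]

def pvScriptP (item : String) : Bool :=
  PySem.Str.endswith item ".py" || PySem.Str.endswith item ".sh"

def pvPlainP (item : String) : Bool :=
  !(PySem.Str.startswith item "-") && !(PySem.Str.isIn "=" item)

-- the reversed ranked fold finds the last script of its input, else (if rank < 2) the last plain token
theorem pvBestLoop_eq (l : List String) (r : Nat) (b : String) (hr : r ≤ 2) :
    pvBestLoop l r b =
      match l.reverse.find? pvScriptP with
      | some s => (2, s)
      | none =>
        if r = 2 then (r, b)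
        else
          match l.reverse.find? pvPlainP with
          | some t => (1, t)
          | none => (r, b) := by
  induction l generalizing r b with
  | nil => simp [pvBestLoop]
  | cons x xs ih =>
    simp only [pvBestLoop, List.reverse_cons, List.find?_append]
    by_cases hs : pvScriptP x = true
    · rw [if_pos (by simpa [pvScriptP] using hs), ih 2 x (le_refl 2)]
      cases hfs : xs.reverse.find? pvScriptP <;> simp [List.find?, hs]
    · rw [if_neg (by simpa [pvScriptP] using hs)]
      by_cases hc : (decide (r < 2) && !PySem.Str.startswith x "-" && !PySem.Str.isIn "=" x) = true
      · have hp : r < 2 ∧ pvPlainP x = true := by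
          simp only [pvPlainP, Bool.and_eq_true, decide_eq_true_eq] at hc ⊢; tauto
        rw [if_pos hc, ih 1 x (by omega)]
        cases hfs : xs.reverse.find? pvScriptP with
        | some s => simp [List.find?, hs]
        | none =>
          have hr2 : r ≠ 2 := by omega
          cases hft : xs.reverse.find? pvPlainP <;>
            simp [List.find?, hs, hp.2, hr2]
      · have hp : ¬ (r < 2 ∧ pvPlainP x = true) := by
          simp only [pvPlainP, Bool.and_eq_true, decide_eq_true_eq, not_and] at hc ⊢; tauto
        rw [if_neg hc, ih r b hr]
        cases hfs : xs.reverse.find? pvScriptP with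
        | some s => simp [List.find?, hs]
        | none =>
          by_cases hr2 : r = 2
          · simp [List.find?, hs, hr2]
          · have hpx : pvPlainP x = false := by
              rcases Bool.eq_false_or_eq_true (pvPlainP x) with h | h
              · exact absurd ⟨by omega, h⟩ hp
              · exact h
            cases hft : xs.reverse.find? pvPlainP <;>
              simp [List.find?, hs, hpx, hr2]

-- ===== VERDICT (by name: the statement is the Claim_ definition above) =====
theorem pvPredS : (fun item => PySem.Str.endswith item ".py" || PySem.Str.endswith item ".sh") = pvScriptP := rfl

theorem pvPredT : (fun item => !(PySem.Str.startswith item "-") && !(PySem.Str.isIn "=" item)) = pvPlainP := rfl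

theorem pvSearch_eq (p0 : String) (rest : List String) :
    (match rest with
      | p1 :: rest2 => if pvBasename p0 == "accelerate" && p1 == "launch" then rest2 else rest
      | [] => rest) =
    (p0 :: rest).drop
      (if pvBasename p0 == "accelerate" && PySem.List.slice (p0 :: rest) (some 1) (some 2) == ["launch"]
       then 2 else 1) := by
  have hslice : PySem.List.slice (p0 :: rest) (some 1) (some 2) = rest.take 1 := by
    simpa using PySem.List.slice_natCast (p0 :: rest) 1 2
  rw [hslice]
  cases rest with
  | nil => simp
  | cons p1 rest2 =>
    by_cases h1 : pvBasename p0 == "accelerate" && p1 == "launch"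
    · have h2 : (pvBasename p0 == "accelerate" && [p1].take 1 == ["launch"]) = true := by
        simp only [Bool.and_eq_true, beq_iff_eq] at h1 ⊢
        exact ⟨h1.1, by simp [h1.2]⟩
      simp [h1]
    · have h2 : (pvBasename p0 == "accelerate" && [p1].take 1 == ["launch"]) = false := by
        simp only [Bool.and_eq_true, beq_iff_eq] at h1 ⊢
        simp only [Bool.and_eq_false_iff, beq_eq_false_iff_ne, List.take_succ_cons,
          List.take_zero, ne_eq, List.cons.injEq, and_true]
        tauto
      simp [h1]

theorem pvCore_eq (sp : List String) (launcher : String) :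
    (if ((sp.find? pvScriptP).getD "") ≠ "" then pvBasename ((sp.find? pvScriptP).getD "")
     else if ((sp.find? pvPlainP).getD "") ≠ "" then pvBasename ((sp.find? pvPlainP).getD "")
     else launcher)
    = (if (pvBestLoop sp.reverse 0 "").2 ≠ "" then pvBasename (pvBestLoop sp.reverse 0 "").2
       else launcher) := by
  rw [pvBestLoop_eq sp.reverse 0 "" (by omega), List.reverse_reverse]
  cases hfs : sp.find? pvScriptP with
  | some s =>
    have hs' := List.find?_some hfs
    have hne : s ≠ "" := by
      intro h; rw [h] at hs'; exact absurd hs' (by decide)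
    simp [hne]
  | none =>
    cases hft : sp.find? pvPlainP with
    | some t => by_cases ht : t = "" <;> simp [ht]
    | none => simp

-- ===== VERDICT (by name: the statement is the Claim_ definition above) =====
theorem command_signature_spec : Claim_equal_command_signature := by
  intro command _
  unfold Spec_command_signature command_signature command_signature_alt
  rw [pvSplit_agree command]
  cases pvSafeSplit command with
  | nil => rfl
  | cons p0 rest =>
    simp only [pvPredS, pvPredT]
    rw [pvSearch_eq p0 rest]
    exact pvCore_eq _ _
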